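-- pv_equiv track=rewrite | github.com/mrdavenguyen/advent_of_code_solutions | 2020/day11/part2.py | get_final_occupied_count
-- ===== SOURCE A (Python) =====
-- from copy import deepcopy
--
-- DIRECTIONS = [(1, 0), (1, 1), (0, 1), (-1, 1), (-1, 0), (-1, -1), (0, -1), (1, -1)]
--
-- def is_within_bounds(grid, col, row):
--     return 0 <= col < len(grid[0]) and 0 <= row < len(grid)
--
-- def implement_seating_based_on_rules(grid):
--     new_grid = deepcopy(grid)
--
--     for row in range(len(grid)):
--         for col in range(len(grid[row])):
--             marker = grid[row][col]
--             if marker == ".":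
--                 continue
--             elif marker == "L" and all_directions_first_seat_unoccupied(grid, col, row):
--                 new_grid[row][col] = "#"
--             elif (
--                 marker == "#"
--                 and count_occupied_first_seats_in_all_directions(grid, col, row) >= 5
--             ):
--                 new_grid[row][col] = "L"
--
--     return new_grid
--
-- def all_directions_first_seat_unoccupied(grid, col, row):
--     for x, y in DIRECTIONS:
--         current_x, current_y = col, row
--
--         while True:
--             next_x, next_y = current_x + x, current_y + y
--
--             if (
--                 not is_within_bounds(grid, next_x, next_y)
--                 or grid[next_y][next_x] == "L"
--             ):
--                 break
--
--             if grid[next_y][next_x] == "#":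
--                 return False
--
--             current_x, current_y = next_x, next_y
--
--     return True
--
-- def count_occupied_first_seats_in_all_directions(grid, col, row):
--     occupied_count = 0
--
--     for x, y in DIRECTIONS:
--         current_x, current_y = col, row
--
--         while True:
--             next_x, next_y = current_x + x, current_y + y
--
--             if (
--                 not is_within_bounds(grid, next_x, next_y)
--                 or grid[next_y][next_x] == "L"
--             ):
--                 break
--
--             if grid[next_y][next_x] == "#":
--                 occupied_count += 1
--                 break
--
--             current_x, current_y = next_x, next_y
--
--     return occupied_count
--
-- def count_total_occupied_seats(grid):
--     return sum(
--         sum(grid[row][col] == "#" for col in range(len(grid[row])))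
--         for row in range(len(grid))
--     )
--
-- def get_final_occupied_count(grid):
--     prev_occupied_count = None
--
--     while True:
--
--         grid = implement_seating_based_on_rules(grid)
--
--         occupied_count = count_total_occupied_seats(grid)
--
--         if occupied_count == prev_occupied_count:
--             return occupied_count
--
--         prev_occupied_count = occupied_count
-- ===== SOURCE B (Python) =====
-- def get_final_occupied_count(grid):
--     DIRS = [(1, 0), (1, 1), (0, 1), (-1, 1), (-1, 0), (-1, -1), (0, -1), (1, -1)]
--     R = len(grid)
--     C = len(grid[0]) if grid else 0
--
--     def seat(y, x):
--         return grid[y][x] in ("L", "#")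
--
--     def ray(r, c, dx, dy):
--         # first seat visible from (r, c) in direction (dx, dy), or None
--         x, y = c + dx, r + dy
--         while 0 <= x < C and 0 <= y < R:
--             if seat(y, x):
--                 return (y, x)
--             x, y = x + dx, y + dy
--         return None
--
--     # static structure: visible-neighbour positions per seat, None for non-seats
--     nbrs = [[[p for p in (ray(r, c, dx, dy) for dx, dy in DIRS) if p is not None]
--              if seat(r, c) else None
--              for c in range(len(grid[r]))]
--             for r in range(R)]
--
--     occ = [[seat(r, c) and grid[r][c] == "#" for c in range(len(grid[r]))] for r in range(R)]
--     prev = None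
--     while True:
--         occ = [[False if lst is None else
--                 (lambda cnt: cnt == 0 if not o else cnt < 5)(
--                     sum(1 for y, x in lst if occ[y][x]))
--                 for lst, o in zip(nrow, orow)]
--                for nrow, orow in zip(nbrs, occ)]
--         n = sum(sum(row) for row in occ)
--         if n == prev:
--             return n
--         prev = n
-- ===== Notes on version B (the rewrite author's own statement) =====
-- stated objective: faster
-- what changed: B precomputes each seat's list of first-visible-seat positions once from the static floor layout and then runs every automaton step as a plain tally over a boolean occupancy matrix, instead of A's re-walking every line-of-sight ray from every seat on every iteration.
-- outside the precondition, e.g. on get_final_occupied_count([['L', 'x'], ['x', 'x'], ['z']]): A returns 1, B returns 1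
import Mathlib
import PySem

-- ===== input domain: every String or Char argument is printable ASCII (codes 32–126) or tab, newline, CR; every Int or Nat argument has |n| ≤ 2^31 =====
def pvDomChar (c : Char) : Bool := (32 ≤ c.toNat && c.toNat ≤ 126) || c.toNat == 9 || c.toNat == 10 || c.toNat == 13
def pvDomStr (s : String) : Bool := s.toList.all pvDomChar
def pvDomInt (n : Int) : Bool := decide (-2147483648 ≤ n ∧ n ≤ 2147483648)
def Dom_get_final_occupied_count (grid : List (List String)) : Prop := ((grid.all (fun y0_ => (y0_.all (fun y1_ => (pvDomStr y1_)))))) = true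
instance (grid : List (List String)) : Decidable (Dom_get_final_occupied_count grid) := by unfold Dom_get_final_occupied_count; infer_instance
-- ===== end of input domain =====

-- B replaces A's per-iteration line-of-sight ray walks by a ONE-TIME precomputation of each
-- seat's visible-neighbour positions; every iteration then only tallies those lists (faster).

-- shared small helpers (DIRECTIONS, indexing, fuel bounds for the while-loops)
def pvDirs : List (Int × Int) := [(1, 0), (1, 1), (0, 1), (-1, 1), (-1, 0), (-1, -1), (0, -1), (1, -1)]
def pvRow (g : List (List String)) (r : Int) : List String := PySem.List.pyGetD g r []
def pvCell (g : List (List String)) (r c : Int) : String := PySem.List.pyGetD (pvRow g r) c ""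
-- fuel for a ray walk: a ray stays in bounds, so it takes < R + C steps (exact bound, both Pythons' inner 'while True')
def pvFuelRay (g : List (List String)) : Nat := g.length + (pvRow g 0).length + 1
-- fuel for the outer 'while True' (generous; both ports use the same guard, 0 returned only at exhaustion)
def pvFuelLoop (g : List (List String)) : Nat := g.length * (pvRow g 0).length + g.length + (pvRow g 0).length + 64

-- ===== PORT A =====
def pvInB (g : List (List String)) (col row : Int) : Bool :=
  decide (0 ≤ col) && decide (col < PySem.List.len (pvRow g 0)) &&
  decide (0 ≤ row) && decide (row < PySem.List.len g)

-- the inner 'while True' of A's two direction scanners: True iff the first seat seen is '#'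
def pvWalkA (g : List (List String)) (dx dy : Int) : Nat → Int → Int → Bool
  | 0, _, _ => false
  | f + 1, cx, cy =>
      let nx := cx + dx
      let ny := cy + dy
      if !pvInB g nx ny || (pvCell g ny nx == "L") then false
      else if pvCell g ny nx == "#" then true
      else pvWalkA g dx dy f nx ny

def pvAllUnoccA (g : List (List String)) (col row : Int) : Bool :=
  pvDirs.all (fun d => !pvWalkA g d.1 d.2 (pvFuelRay g) col row)

def pvCountOccA (g : List (List String)) (col row : Int) : Int :=
  pvDirs.foldl (fun acc d => if pvWalkA g d.1 d.2 (pvFuelRay g) col row then acc + 1 else acc) 0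

def pvStepA (g : List (List String)) : List (List String) :=
  (PySem.List.pyRange 0 (PySem.List.len g) 1).map (fun r =>
    (PySem.List.pyRange 0 (PySem.List.len (pvRow g r)) 1).map (fun c =>
      let m := pvCell g r c
      if m == "." then m
      else if m == "L" && pvAllUnoccA g c r then "#"
      else if m == "#" && decide (5 ≤ pvCountOccA g c r) then "L"
      else m))

def pvCountTotalA (g : List (List String)) : Int :=
  (g.map (fun row => (row.map (fun s => if s == "#" then (1 : Int) else 0)).sum)).sum

def pvLoopA : Nat → Option Int → List (List String) → Int
  | 0, _, _ => 0
  | f + 1, prev, g =>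
      let g' := pvStepA g
      let c := pvCountTotalA g'
      if some c == prev then c else pvLoopA f (some c) g'

def get_final_occupied_count (grid : List (List String)) : Int :=
  pvLoopA (pvFuelLoop grid) none grid

-- ===== PORT B =====
def pvSeatB (g0 : List (List String)) (y x : Int) : Bool :=
  pvCell g0 y x == "L" || pvCell g0 y x == "#"

-- Source B's ray: first visible seat POSITION from a start cell, or none
def pvRayB (g0 : List (List String)) (C R : Int) (dx dy : Int) : Nat → Int → Int → Option (Int × Int)
  | 0, _, _ => none
  | f + 1, x, y =>
      if 0 ≤ x ∧ x < C ∧ 0 ≤ y ∧ y < R then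
        if pvSeatB g0 y x then some (y, x)
        else pvRayB g0 C R dx dy f (x + dx) (y + dy)
      else none

def pvOccAt (occ : List (List Bool)) (y x : Int) : Bool :=
  PySem.List.pyGetD (PySem.List.pyGetD occ y []) x false

def pvNbrsB (g0 : List (List String)) (R C : Int) : List (List (Option (List (Int × Int)))) :=
  (PySem.List.pyRange 0 R 1).map (fun r =>
    (PySem.List.pyRange 0 (PySem.List.len (pvRow g0 r)) 1).map (fun c =>
      if pvSeatB g0 r c then
        some (pvDirs.filterMap (fun d => pvRayB g0 C R d.1 d.2 (pvFuelRay g0) (c + d.1) (r + d.2)))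
      else none))

def pvOcc0B (g0 : List (List String)) (R : Int) : List (List Bool) :=
  (PySem.List.pyRange 0 R 1).map (fun r =>
    (PySem.List.pyRange 0 (PySem.List.len (pvRow g0 r)) 1).map (fun c =>
      pvSeatB g0 r c && (pvCell g0 r c == "#")))

def pvCntB (occ : List (List Bool)) (lst : List (Int × Int)) : Int :=
  (lst.map (fun p => if pvOccAt occ p.1 p.2 then (1 : Int) else 0)).sum

def pvStepB (nbrs : List (List (Option (List (Int × Int))))) (occ : List (List Bool)) :
    List (List Bool) :=
  (nbrs.zip occ).map (fun rp =>
    (rp.1.zip rp.2).map (fun cp =>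
      match cp.1 with
      | none => false
      | some lst =>
          if !cp.2 then decide (pvCntB occ lst = 0) else decide (pvCntB occ lst < 5)))

def pvSumB (occ : List (List Bool)) : Int :=
  (occ.map (fun row => (row.map (fun b => if b then (1 : Int) else 0)).sum)).sum

def pvLoopB (nbrs : List (List (Option (List (Int × Int))))) :
    Nat → Option Int → List (List Bool) → Int
  | 0, _, _ => 0
  | f + 1, prev, occ =>
      let occ' := pvStepB nbrs occ
      let n := pvSumB occ'
      if some n == prev then n else pvLoopB nbrs f (some n) occ'

def get_final_occupied_count_alt (grid : List (List String)) : Int :=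
  let R : Int := PySem.List.len grid
  let C : Int := if grid.isEmpty then 0 else PySem.List.len (PySem.List.pyGetD grid 0 [])
  pvLoopB (pvNbrsB grid R C) (pvFuelLoop grid) none (pvOcc0B grid R)

-- ===== PRECONDITION & SPEC =====
-- Pre_ excludes grids that have a row shorter than row 0 AND contain a seat ("L"/"#"): A's ray
-- walks bound columns by row 0's length only, so on such grids they generally raise IndexError
-- mid-walk (and B does likewise); seatless grids trigger no walks and are kept.
def Pre_get_final_occupied_count (grid : List (List String)) : Prop :=
  (∀ row ∈ grid, (grid.headD []).length ≤ row.length) ∨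
  (∀ row ∈ grid, ∀ s ∈ row, ¬(s = "L" ∨ s = "#"))
instance (grid : List (List String)) : Decidable (Pre_get_final_occupied_count grid) := by
  unfold Pre_get_final_occupied_count; infer_instance

def pvWitness_get_final_occupied_count : List (List String) := [["L", "."], [".", "#"]]

def Spec_get_final_occupied_count (grid : List (List String)) (out : Int) : Prop := out = get_final_occupied_count_alt grid
instance (grid : List (List String)) (out : Int) : Decidable (Spec_get_final_occupied_count grid out) := by unfold Spec_get_final_occupied_count; infer_instance

-- ===== CLAIM (what is proved, stated in full; the proofs are below) =====
def Claim_equal_get_final_occupied_count : Prop := ∀ (grid : List (List String)), Dom_get_final_occupied_count grid → Pre_get_final_occupied_count grid → Spec_get_final_occupied_count grid (get_final_occupied_count grid)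

-- ===== LEMMAS AND PROOFS =====

-- the first disjunct of Pre_: no row is shorter than row 0
def pvRect (g : List (List String)) : Prop := ∀ row ∈ g, (g.headD []).length ≤ row.length

-- the invariant tying A's current grid g to B's current occupancy matrix occ (g0 = the input)
def pvRel (g0 g : List (List String)) (occ : List (List Bool)) : Prop :=
  g.length = g0.length ∧ occ.length = g0.length ∧
  (∀ r : Nat, r < g0.length →
    (pvRow g r).length = (pvRow g0 r).length ∧
    (PySem.List.pyGetD occ (r : Int) []).length = (pvRow g0 r).length) ∧
  (∀ r c : Nat, r < g0.length → c < (pvRow g0 r).length →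
    (pvSeatB g0 r c = true → pvCell g r c = (if pvOccAt occ r c then "#" else "L")) ∧
    (pvSeatB g0 r c = false → pvCell g r c = pvCell g0 r c ∧ pvOccAt occ r c = false))

lemma pv_C_eq (g0 : List (List String)) :
    (if g0.isEmpty then 0 else PySem.List.len (PySem.List.pyGetD g0 0 [])) =
      ((pvRow g0 0).length : Int) := by
  cases g0 with
  | nil => simp [pvRow, PySem.List.pyGetD]
  | cons a t => simp [pvRow, PySem.List.pyGetD_zero, PySem.List.len_eq]

lemma pv_cell_eq (g : List (List String)) (r c : Nat) :
    pvCell g (r : Int) (c : Int) = (g.getD r []).getD c "" := by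
  simp [pvCell, pvRow]

lemma pv_occAt_eq (occ : List (List Bool)) (r c : Nat) :
    pvOccAt occ (r : Int) (c : Int) = (occ.getD r []).getD c false := by
  simp [pvOccAt]

lemma pv_getD_elem {A : Type} (xs : List A) (d : A) (r : Nat) (hr : r < xs.length) :
    PySem.List.pyGetD xs (r : Int) d = xs[r] := by
  rw [PySem.List.pyGetD_natCast]
  exact List.getD_eq_getElem _ _ hr

lemma pv_rowge (g0 : List (List String)) (hrect : pvRect g0)
    (r : Nat) (hr : r < g0.length) :
    (pvRow g0 0).length ≤ (pvRow g0 (r : Int)).length := by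
  have h0 : (0 : Nat) < g0.length := lt_of_le_of_lt (Nat.zero_le r) hr
  simp only [pvRow, PySem.List.pyGetD_natCast, PySem.List.pyGetD_zero]
  rw [List.getD_eq_getElem _ _ hr, List.getD_eq_getElem _ _ h0]
  have h2 : g0[0] = g0.headD [] := by
    cases g0 with
    | nil => simp at h0
    | cons x t => rfl
  rw [h2]
  exact hrect _ (List.getElem_mem hr)

lemma pv_row0_eq (g0 g : List (List String)) (occ : List (List Bool))
    (hrel : pvRel g0 g occ) : (pvRow g 0).length = (pvRow g0 0).length := by
  obtain ⟨hg, -, hrows, -⟩ := hrel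
  rcases Nat.eq_zero_or_pos g0.length with h0 | h0
  · have hgnil : g = [] := List.eq_nil_of_length_eq_zero (hg.trans h0)
    have hg0nil : g0 = [] := List.eq_nil_of_length_eq_zero h0
    rw [hgnil, hg0nil]
  · have := (hrows 0 h0).1
    simpa using this

lemma pv_fuel_eq (g0 g : List (List String)) (occ : List (List Bool))
    (hrel : pvRel g0 g occ) : pvFuelRay g = pvFuelRay g0 := by
  obtain ⟨hg, -, hrows, -⟩ := hrel
  unfold pvFuelRay
  rcases Nat.eq_zero_or_pos g0.length with h0 | h0
  · have : g = [] := List.eq_nil_of_length_eq_zero (hg.trans h0)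
    subst this
    have : g0 = [] := List.eq_nil_of_length_eq_zero h0
    subst this; rfl
  · have := (hrows 0 h0).1
    have h1 := (hrows 0 h0).1
    simp only [Nat.cast_zero] at h1
    omega

lemma pv_inB_eq (g0 g : List (List String)) (occ : List (List Bool))
    (hrel : pvRel g0 g occ) (x y : Int) :
    pvInB g x y =
      decide (0 ≤ x ∧ x < ((pvRow g0 0).length : Int) ∧ 0 ≤ y ∧ y < (g0.length : Int)) := by
  have h0 := pv_row0_eq g0 g occ hrel
  obtain ⟨hg, -, -, -⟩ := hrel
  unfold pvInB
  rw [PySem.List.len_eq, PySem.List.len_eq, h0, hg]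
  simp [Bool.and_assoc]

lemma pv_walk (g0 g : List (List String)) (occ : List (List Bool))
    (hrect : pvRect g0) (hrel : pvRel g0 g occ) (dx dy : Int) :
    ∀ (f : Nat) (cx cy : Int),
      pvWalkA g dx dy f cx cy =
        (pvRayB g0 ((pvRow g0 0).length : Int) (g0.length : Int) dx dy f (cx + dx) (cy + dy)).elim
          false (fun p => pvOccAt occ p.1 p.2) := by
  intro f
  induction f with
  | zero => intro cx cy; simp [pvWalkA, pvRayB]
  | succ f ih =>
      intro cx cy
      by_cases hin : (0 ≤ cx + dx ∧ cx + dx < ((pvRow g0 0).length : Int) ∧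
          0 ≤ cy + dy ∧ cy + dy < (g0.length : Int))
      · obtain ⟨hx0, hxC, hy0, hyR⟩ := hin
        have hnx : ((((cx + dx).toNat : Nat)) : Int) = cx + dx := Int.toNat_of_nonneg hx0
        have hny : ((((cy + dy).toNat : Nat)) : Int) = cy + dy := Int.toNat_of_nonneg hy0
        have hr : (cy + dy).toNat < g0.length := by omega
        have hcC : (cx + dx).toNat < (pvRow g0 0).length := by omega
        have hc : (cx + dx).toNat < (pvRow g0 ((cy + dy).toNat : Int)).length :=
          lt_of_lt_of_le hcC (pv_rowge g0 hrect _ hr)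
        have hcs := hrel.2.2.2 (cy + dy).toNat (cx + dx).toNat hr hc
        rw [hnx, hny] at hcs
        have hIB : pvInB g (cx + dx) (cy + dy) = true := by
          rw [pv_inB_eq g0 g occ hrel]
          exact decide_eq_true ⟨hx0, hxC, hy0, hyR⟩
        have hray : pvRayB g0 ((pvRow g0 0).length : Int) (g0.length : Int) dx dy (f + 1)
            (cx + dx) (cy + dy) =
            (if pvSeatB g0 (cy + dy) (cx + dx) = true then some (cy + dy, cx + dx)
             else pvRayB g0 ((pvRow g0 0).length : Int) (g0.length : Int) dx dy f
               (cx + dx + dx) (cy + dy + dy)) := by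
          simp only [pvRayB]
          rw [if_pos ⟨hx0, hxC, hy0, hyR⟩]
        cases hseat : pvSeatB g0 (cy + dy) (cx + dx) with
        | true =>
            have hcg := hcs.1 hseat
            rw [hray, if_pos hseat]
            cases hoc : pvOccAt occ (cy + dy) (cx + dx) with
            | true =>
                rw [hoc] at hcg
                simp only [pvWalkA, hIB, hcg]
                simp [hoc]
            | false =>
                rw [hoc] at hcg
                simp only [pvWalkA, hIB, hcg]
                simp [hoc]
        | false =>
            have hcg := hcs.2 hseat
            have hs : (pvCell g0 (cy + dy) (cx + dx) == "L") = false ∧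
                (pvCell g0 (cy + dy) (cx + dx) == "#") = false := by
              unfold pvSeatB at hseat
              constructor <;> simp_all
            rw [hray, if_neg (by simp [hseat])]
            simp only [pvWalkA, hIB, hcg.1, hs.1, hs.2, Bool.not_true, Bool.or_false,
              Bool.false_eq_true, if_false]
            exact ih (cx + dx) (cy + dy)
      · have hIB : pvInB g (cx + dx) (cy + dy) = false := by
          rw [pv_inB_eq g0 g occ hrel]
          exact decide_eq_false hin
        have hray : pvRayB g0 ((pvRow g0 0).length : Int) (g0.length : Int) dx dy (f + 1)
            (cx + dx) (cy + dy) = none := by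
          simp only [pvRayB]
          rw [if_neg hin]
        rw [hray]
        simp [pvWalkA, hIB]

lemma pv_sum_filterMap {A B : Type} (l : List A) (f : A → Option B) (P : B → Bool) :
    ((l.filterMap f).map (fun b => if P b then (1 : Int) else 0)).sum
      = (l.countP (fun a => (f a).elim false P) : Int) := by
  induction l with
  | nil => simp
  | cons hd tl ih =>
      cases h : f hd with
      | none => simp [h, ih, Option.elim]
      | some b => simp [h, List.countP_cons, ih, Option.elim]; omega

lemma pv_all_not_eq_countP_zero {A : Type} (l : List A) (p : A → Bool) :
    l.all (fun a => !p a) = decide (l.countP p = 0) := by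
  induction l with
  | nil => simp
  | cons hd tl ih => cases h : p hd <;> simp [h, ih]

lemma pv_cnt (g0 g : List (List String)) (occ : List (List Bool))
    (hrect : pvRect g0) (hrel : pvRel g0 g occ) (col row : Int) :
    pvCountOccA g col row =
      pvCntB occ (pvDirs.filterMap (fun d =>
        pvRayB g0 ((pvRow g0 0).length : Int) (g0.length : Int) d.1 d.2 (pvFuelRay g0)
          (col + d.1) (row + d.2))) := by
  unfold pvCountOccA pvCntB
  rw [PySem.List.foldl_if_add_one, pv_sum_filterMap]
  have hgoal : List.countP (fun d : Int × Int => pvWalkA g d.1 d.2 (pvFuelRay g) col row) pvDirs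
      = List.countP (fun d : Int × Int =>
          (pvRayB g0 ((pvRow g0 0).length : Int) (g0.length : Int) d.1 d.2 (pvFuelRay g0)
            (col + d.1) (row + d.2)).elim false (fun p => pvOccAt occ p.1 p.2)) pvDirs := by
    apply List.countP_congr
    intro d _
    rw [pv_fuel_eq g0 g occ hrel]
    exact iff_of_eq (congrArg (· = true) (pv_walk g0 g occ hrect hrel d.1 d.2 (pvFuelRay g0) col row))
  rw [hgoal]
  simp

lemma pv_allUnocc (g0 g : List (List String)) (occ : List (List Bool))
    (hrect : pvRect g0) (hrel : pvRel g0 g occ) (col row : Int) :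
    pvAllUnoccA g col row =
      decide (pvCntB occ (pvDirs.filterMap (fun d =>
        pvRayB g0 ((pvRow g0 0).length : Int) (g0.length : Int) d.1 d.2 (pvFuelRay g0)
          (col + d.1) (row + d.2))) = 0) := by
  rw [← pv_cnt g0 g occ hrect hrel col row]
  unfold pvCountOccA pvAllUnoccA
  rw [PySem.List.foldl_if_add_one, pv_all_not_eq_countP_zero]
  simp

lemma pv_sum2_eq {A B : Type} (f : A → Int) (g : B → Int) :
    ∀ (xs : List A) (ys : List B), xs.length = ys.length →
      (∀ i (h1 : i < xs.length) (h2 : i < ys.length), f xs[i] = g ys[i]) →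
      (xs.map f).sum = (ys.map g).sum := by
  intro xs
  induction xs with
  | nil => intro ys h _; simp [List.eq_nil_of_length_eq_zero h.symm]
  | cons a tl ih =>
      intro ys h hp
      cases ys with
      | nil => simp at h
      | cons b tl' =>
          simp only [List.map_cons, List.sum_cons]
          have h0 := hp 0 (by simp) (by simp)
          simp only [List.getElem_cons_zero] at h0
          rw [h0, ih tl' (by simpa using h)
            (fun i h1 h2 => by simpa using hp (i + 1) (by simpa using h1) (by simpa using h2))]

lemma pv_count_total (g0 g : List (List String)) (occ : List (List Bool))
    (hrel : pvRel g0 g occ) : pvCountTotalA g = pvSumB occ := by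
  obtain ⟨hg, hocc, hrows, hcell⟩ := hrel
  unfold pvCountTotalA pvSumB
  apply pv_sum2_eq _ _ g occ (by omega)
  intro i h1 h2
  have hig0 : i < g0.length := by omega
  have e1 : pvRow g (i : Int) = g[i] := by
    unfold pvRow
    rw [PySem.List.pyGetD_natCast]
    exact List.getD_eq_getElem _ _ h1
  have e2 : PySem.List.pyGetD occ (i : Int) [] = occ[i] := by
    rw [PySem.List.pyGetD_natCast]
    exact List.getD_eq_getElem _ _ h2
  have hlen1 : g[i].length = (pvRow g0 (i : Int)).length := by
    rw [← e1]; exact (hrows i hig0).1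
  have hlen2 : occ[i].length = (pvRow g0 (i : Int)).length := by
    rw [← e2]; exact (hrows i hig0).2
  apply pv_sum2_eq _ _ g[i] occ[i] (by omega)
  intro j j1 j2
  have hj : j < (pvRow g0 (i : Int)).length := by omega
  have hcs := hcell i j hig0 hj
  have e3 : pvCell g (i : Int) (j : Int) = g[i][j] := by
    rw [pv_cell_eq, List.getD_eq_getElem _ _ h1, List.getD_eq_getElem _ _ j1]
  have e4 : pvOccAt occ (i : Int) (j : Int) = occ[i][j] := by
    rw [pv_occAt_eq, List.getD_eq_getElem _ _ h2, List.getD_eq_getElem _ _ j2]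
  cases hseat : pvSeatB g0 (i : Int) (j : Int) with
  | true =>
      have hcg := hcs.1 hseat
      rw [e3, e4] at hcg
      cases hoc : occ[i][j] with
      | true => rw [hoc] at hcg; simp [hcg]
      | false => rw [hoc] at hcg; simp [hcg]
  | false =>
      have hcg := hcs.2 hseat
      have hnh : (pvCell g0 (i : Int) (j : Int) == "#") = false := by
        unfold pvSeatB at hseat; simp_all
      rw [e3, e4] at hcg
      rw [hcg.1, hnh, hcg.2]

lemma pv_stepA_row (g : List (List String)) (r : Nat) (hr : r < g.length) :
    pvRow (pvStepA g) (r : Int) =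
      (PySem.List.pyRange 0 (PySem.List.len (pvRow g (r : Int))) 1).map (fun c =>
        if pvCell g (r : Int) c == "." then pvCell g (r : Int) c
        else if pvCell g (r : Int) c == "L" && pvAllUnoccA g c (r : Int) then "#"
        else if pvCell g (r : Int) c == "#" && decide (5 ≤ pvCountOccA g c (r : Int)) then "L"
        else pvCell g (r : Int) c) := by
  show PySem.List.pyGetD (pvStepA g) (r : Int) [] = _
  unfold pvStepA
  rw [PySem.List.len_eq]
  exact PySem.List.pyGetD_map_pyRange _ g.length r [] hr

lemma pv_stepA_cell (g : List (List String)) (r c : Nat) (hr : r < g.length)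
    (hc : c < (pvRow g (r : Int)).length) :
    pvCell (pvStepA g) (r : Int) (c : Int) =
      (if pvCell g (r : Int) (c : Int) == "." then pvCell g (r : Int) (c : Int)
       else if pvCell g (r : Int) (c : Int) == "L" && pvAllUnoccA g (c : Int) (r : Int) then "#"
       else if pvCell g (r : Int) (c : Int) == "#" &&
           decide (5 ≤ pvCountOccA g (c : Int) (r : Int)) then "L"
       else pvCell g (r : Int) (c : Int)) := by
  show PySem.List.pyGetD (pvRow (pvStepA g) (r : Int)) (c : Int) "" = _
  rw [pv_stepA_row g r hr, PySem.List.len_eq]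
  exact PySem.List.pyGetD_map_pyRange _ (pvRow g (r : Int)).length c "" hc

lemma pv_nbrsB_row (g0 : List (List String)) (r : Nat) (hr : r < g0.length) :
    PySem.List.pyGetD (pvNbrsB g0 (PySem.List.len g0) ((pvRow g0 0).length : Int)) (r : Int) [] =
      (PySem.List.pyRange 0 ((pvRow g0 (r : Int)).length : Int) 1).map (fun c =>
        if pvSeatB g0 (r : Int) c then
          some (pvDirs.filterMap (fun d =>
            pvRayB g0 ((pvRow g0 0).length : Int) ((g0.length : Nat) : Int) d.1 d.2 (pvFuelRay g0)
              (c + d.1) ((r : Int) + d.2)))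
        else none) := by
  unfold pvNbrsB
  simp only [PySem.List.len_eq]
  exact PySem.List.pyGetD_map_pyRange _ g0.length r [] hr

lemma pv_nbrsB_len (g0 : List (List String)) :
    (pvNbrsB g0 (PySem.List.len g0) ((pvRow g0 0).length : Int)).length = g0.length := by
  simp [pvNbrsB, PySem.List.len_eq, PySem.List.pyRange_zero_natCast]

lemma pv_step_rel (g0 g : List (List String)) (occ : List (List Bool))
    (hrect : pvRect g0) (hrel : pvRel g0 g occ) :
    pvRel g0 (pvStepA g)
      (pvStepB (pvNbrsB g0 (PySem.List.len g0) ((pvRow g0 0).length : Int)) occ) := by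
  obtain ⟨hg, hocc, hrows, hcell⟩ := hrel
  have hn_len := pv_nbrsB_len g0
  have hB_len : (pvStepB (pvNbrsB g0 (PySem.List.len g0) ((pvRow g0 0).length : Int)) occ).length
      = g0.length := by
    simp only [pvStepB, List.length_map, List.length_zip, hn_len, hocc, Nat.min_self]
  have hB_row : ∀ (r : Nat) (hr : r < g0.length)
      (h1 : r < (pvNbrsB g0 (PySem.List.len g0) ((pvRow g0 0).length : Int)).length)
      (h2 : r < occ.length),
      PySem.List.pyGetD
          (pvStepB (pvNbrsB g0 (PySem.List.len g0) ((pvRow g0 0).length : Int)) occ) (r : Int) [] =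
        (((pvNbrsB g0 (PySem.List.len g0) ((pvRow g0 0).length : Int))[r]'h1).zip
            (occ[r]'h2)).map (fun cp =>
          match cp.1 with
          | none => false
          | some lst =>
              if !cp.2 then decide (pvCntB occ lst = 0) else decide (pvCntB occ lst < 5)) := by
    intro r hr h1 h2
    rw [pv_getD_elem _ [] r (by rw [hB_len]; exact hr)]
    simp only [pvStepB, List.getElem_map, List.getElem_zip]
  have hn_rowlen : ∀ (r : Nat) (hr : r < g0.length)
      (h1 : r < (pvNbrsB g0 (PySem.List.len g0) ((pvRow g0 0).length : Int)).length),
      ((pvNbrsB g0 (PySem.List.len g0) ((pvRow g0 0).length : Int))[r]'h1).length =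
        (pvRow g0 (r : Int)).length := by
    intro r hr h1
    rw [← pv_getD_elem _ [] r h1, pv_nbrsB_row g0 r hr]
    simp only [List.length_map, PySem.List.pyRange_zero_natCast, List.length_range]
  have hocc_rowlen : ∀ (r : Nat) (hr : r < g0.length) (h2 : r < occ.length),
      (occ[r]'h2).length = (pvRow g0 (r : Int)).length := by
    intro r hr h2
    rw [← pv_getD_elem _ [] r h2]
    exact (hrows r hr).2
  refine ⟨?_, hB_len, ?_, ?_⟩
  · simp [pvStepA, PySem.List.len_eq, PySem.List.pyRange_zero_natCast, hg]
  · intro r hr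
    have h1 : r < (pvNbrsB g0 (PySem.List.len g0) ((pvRow g0 0).length : Int)).length := by
      rw [hn_len]; exact hr
    have h2 : r < occ.length := by rw [hocc]; exact hr
    constructor
    · rw [pv_stepA_row g r (by rw [hg]; exact hr)]
      simp only [List.length_map, PySem.List.len_eq, PySem.List.pyRange_zero_natCast,
        List.length_range]
      simpa using (hrows r hr).1
    · rw [hB_row r hr h1 h2]
      simp only [List.length_map, List.length_zip, hn_rowlen r hr h1, hocc_rowlen r hr h2,
        Nat.min_self]
  · intro r c hr hc
    have h1 : r < (pvNbrsB g0 (PySem.List.len g0) ((pvRow g0 0).length : Int)).length := by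
      rw [hn_len]; exact hr
    have h2 : r < occ.length := by rw [hocc]; exact hr
    have hc1 : c < ((pvNbrsB g0 (PySem.List.len g0) ((pvRow g0 0).length : Int))[r]'h1).length := by
      rw [hn_rowlen r hr h1]; exact hc
    have hc2 : c < (occ[r]'h2).length := by rw [hocc_rowlen r hr h2]; exact hc
    have hcg : c < (pvRow g (r : Int)).length := by rw [(hrows r hr).1]; exact hc
    have hA := pv_stepA_cell g r c (by rw [hg]; exact hr) hcg
    have hn_cell : ((pvNbrsB g0 (PySem.List.len g0) ((pvRow g0 0).length : Int))[r]'h1)[c]'hc1 =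
        (if pvSeatB g0 (r : Int) (c : Int) then
          some (pvDirs.filterMap (fun d =>
            pvRayB g0 ((pvRow g0 0).length : Int) ((g0.length : Nat) : Int) d.1 d.2
              (pvFuelRay g0) ((c : Int) + d.1) ((r : Int) + d.2)))
        else none) := by
      have e1 := pv_getD_elem _ ([] : List (Option (List (Int × Int)))) r h1
      rw [← pv_getD_elem _ none c hc1, ← e1, pv_nbrsB_row g0 r hr]
      exact PySem.List.pyGetD_map_pyRange _ (pvRow g0 (r : Int)).length c none hc
    have hocc_cell : (occ[r]'h2)[c]'hc2 = pvOccAt occ (r : Int) (c : Int) := by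
      rw [pv_occAt_eq, List.getD_eq_getElem _ _ h2, List.getD_eq_getElem _ _ hc2]
    have hBcell : pvOccAt
        (pvStepB (pvNbrsB g0 (PySem.List.len g0) ((pvRow g0 0).length : Int)) occ)
        (r : Int) (c : Int) =
        (match ((pvNbrsB g0 (PySem.List.len g0) ((pvRow g0 0).length : Int))[r]'h1)[c]'hc1 with
         | none => false
         | some lst =>
             if !(occ[r]'h2)[c]'hc2 then decide (pvCntB occ lst = 0)
             else decide (pvCntB occ lst < 5)) := by
      unfold pvOccAt
      rw [hB_row r hr h1 h2]
      rw [pv_getD_elem _ false c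
        (by simp only [List.length_map, List.length_zip, hn_rowlen r hr h1,
              hocc_rowlen r hr h2, Nat.min_self]; exact hc)]
      simp only [List.getElem_map, List.getElem_zip]
    rw [hn_cell, hocc_cell] at hBcell
    have hcs := hcell r c hr hc
    cases hseat : pvSeatB g0 (r : Int) (c : Int) with
    | false =>
        have hcg0 := hcs.2 hseat
        have hs : (pvCell g0 (r : Int) (c : Int) == "L") = false ∧
            (pvCell g0 (r : Int) (c : Int) == "#") = false := by
          unfold pvSeatB at hseat
          constructor <;> simp_all
        rw [hseat] at hBcell
        simp only [if_false, Bool.false_eq_true] at hBcell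
        refine ⟨fun h => by simp at h, fun _ => ⟨?_, by rw [hBcell]⟩⟩
        rw [hA, hcg0.1]
        simp [hs.1, hs.2]
    | true =>
        have hcg0 := hcs.1 hseat
        rw [hseat, if_pos rfl] at hBcell
        refine ⟨fun _ => ?_, fun h => by simp at h⟩
        have hcnt := pv_cnt g0 g occ hrect ⟨hg, hocc, hrows, hcell⟩ (c : Int) (r : Int)
        have hall := pv_allUnocc g0 g occ hrect ⟨hg, hocc, hrows, hcell⟩ (c : Int) (r : Int)
        cases hoc : pvOccAt occ (r : Int) (c : Int) with
        | false =>
            rw [hoc] at hBcell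
            simp only [Bool.not_false] at hBcell
            rw [hA, hcg0, hoc, hBcell, ← hall]
            cases hau : pvAllUnoccA g (c : Int) (r : Int) <;> simp
        | true =>
            rw [hoc] at hBcell
            simp only [Bool.not_true, Bool.false_eq_true, if_false] at hBcell
            rw [hA, hcg0, hoc, hBcell, ← hcnt]
            by_cases h5 : (5 : Int) ≤ pvCountOccA g (c : Int) (r : Int)
            · have d1 : decide (5 ≤ pvCountOccA g (c : Int) (r : Int)) = true := decide_eq_true h5
              have d2 : decide (pvCountOccA g (c : Int) (r : Int) < 5) = false :=
                decide_eq_false (not_lt.mpr h5)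
              simp [d1, d2]
            · have d1 : decide (5 ≤ pvCountOccA g (c : Int) (r : Int)) = false :=
                decide_eq_false h5
              have d2 : decide (pvCountOccA g (c : Int) (r : Int) < 5) = true :=
                decide_eq_true (not_le.mp h5)
              simp [d1, d2]

theorem pv_main (g0 : List (List String)) (hrect : pvRect g0) :
    ∀ (f : Nat) (g : List (List String)) (occ : List (List Bool)), pvRel g0 g occ →
    ∀ (prev : Option Int),
    pvLoopA f prev g =
      pvLoopB (pvNbrsB g0 (PySem.List.len g0)
          (if g0.isEmpty then 0 else PySem.List.len (PySem.List.pyGetD g0 0 []))) f prev occ := by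
  intro f
  induction f with
  | zero => intro g occ hrel prev; rfl
  | succ f ih =>
      intro g occ hrel prev
      rw [pv_C_eq]
      have hrel' := pv_step_rel g0 g occ hrect hrel
      have hcnt := pv_count_total g0 (pvStepA g) _ hrel'
      show (if some (pvCountTotalA (pvStepA g)) == prev then pvCountTotalA (pvStepA g)
            else pvLoopA f (some (pvCountTotalA (pvStepA g))) (pvStepA g)) = _
      rw [hcnt]
      show _ = (if some (pvSumB _) == prev then pvSumB _ else pvLoopB _ f (some (pvSumB _)) _)
      by_cases hb : some (pvSumB (pvStepB
          (pvNbrsB g0 (PySem.List.len g0) ((pvRow g0 0).length : Int)) occ)) == prev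
      · simp only [hb, if_true]
      · simp only [hb]
        have := ih (pvStepA g) _ hrel' (some (pvSumB (pvStepB
          (pvNbrsB g0 (PySem.List.len g0) ((pvRow g0 0).length : Int)) occ)))
        rw [pv_C_eq] at this
        exact this

theorem pv_rel_init (g0 : List (List String)) :
    pvRel g0 g0 (pvOcc0B g0 (PySem.List.len g0)) := by
  have hrow : ∀ r : Nat, r < g0.length →
      PySem.List.pyGetD (pvOcc0B g0 (PySem.List.len g0)) (r : Int) [] =
        (PySem.List.pyRange 0 ((pvRow g0 (r : Int)).length : Int) 1).map (fun c =>
          pvSeatB g0 (r : Int) c && (pvCell g0 (r : Int) c == "#")) := by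
    intro r hr
    unfold pvOcc0B
    simp only [PySem.List.len_eq]
    exact PySem.List.pyGetD_map_pyRange _ g0.length r [] hr
  have hcl : ∀ r c : Nat, r < g0.length → c < (pvRow g0 (r : Int)).length →
      pvOccAt (pvOcc0B g0 (PySem.List.len g0)) (r : Int) (c : Int) =
        (pvSeatB g0 (r : Int) (c : Int) && (pvCell g0 (r : Int) (c : Int) == "#")) := by
    intro r c hr hc
    unfold pvOccAt
    rw [hrow r hr]
    exact PySem.List.pyGetD_map_pyRange _ (pvRow g0 (r : Int)).length c false hc
  refine ⟨rfl, ?_, ?_, ?_⟩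
  · simp [pvOcc0B, PySem.List.len_eq, PySem.List.pyRange_zero_natCast]
  · intro r hr
    refine ⟨rfl, ?_⟩
    rw [hrow r hr]
    simp [PySem.List.pyRange_zero_natCast]
  · intro r c hr hc
    rw [hcl r c hr hc]
    constructor
    · intro hseat
      rw [hseat, Bool.true_and]
      cases hx : pvCell g0 (r : Int) (c : Int) == "#" with
      | true => simpa using hx
      | false =>
          have : (pvCell g0 (r : Int) (c : Int) == "L") = true := by
            unfold pvSeatB at hseat
            simp_all
          simpa using this
    · intro hseat
      rw [hseat, Bool.false_and]
      exact ⟨rfl, rfl⟩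

-- the seatless case: neither program ever walks a ray; both settle at once with count 0
def pvNoSeat (g : List (List String)) : Prop := ∀ row ∈ g, ∀ s ∈ row, ¬(s = "L" ∨ s = "#")

lemma pv_stepA_noseat (g : List (List String)) (h : pvNoSeat g) : pvStepA g = g := by
  apply List.ext_getElem
  · simp [pvStepA, PySem.List.len_eq, PySem.List.pyRange_zero_natCast]
  · intro r h1 h2
    have hr : r < g.length := h2
    rw [← pv_getD_elem _ [] r h1]
    show pvRow (pvStepA g) (r : Int) = g[r]
    rw [pv_stepA_row g r hr]
    apply List.ext_getElem
    · simp only [List.length_map, PySem.List.len_eq, PySem.List.pyRange_zero_natCast,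
        List.length_range]
      simp [pvRow, List.getElem?_eq_getElem hr]
    · intro c hc1 hc2
      have hrow : pvRow g (r : Int) = g[r] := pv_getD_elem _ [] r hr
      have hc : c < (pvRow g (r : Int)).length := by
        simpa [PySem.List.len_eq, PySem.List.pyRange_zero_natCast, hrow] using hc1
      have hcell : pvCell g (r : Int) (c : Int) = g[r][c] := by
        rw [pv_cell_eq, List.getD_eq_getElem _ _ hr,
          List.getD_eq_getElem _ _ (by rw [← hrow]; exact hc)]
      have hmem : g[r][c] ∈ g[r] := List.getElem_mem _
      have hno := h g[r] (List.getElem_mem hr) g[r][c] hmem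
      have hL : (pvCell g (r : Int) (c : Int) == "L") = false := by
        rw [hcell]; simp_all
      have hH : (pvCell g (r : Int) (c : Int) == "#") = false := by
        rw [hcell]; simp_all
      have : ((PySem.List.pyRange 0 (PySem.List.len (pvRow g (r : Int))) 1).map (fun cc =>
          if pvCell g (r : Int) cc == "." then pvCell g (r : Int) cc
          else if pvCell g (r : Int) cc == "L" && pvAllUnoccA g cc (r : Int) then "#"
          else if pvCell g (r : Int) cc == "#" &&
              decide (5 ≤ pvCountOccA g cc (r : Int)) then "L"
          else pvCell g (r : Int) cc))[c]'hc1 =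
          (if pvCell g (r : Int) (c : Int) == "." then pvCell g (r : Int) (c : Int)
           else if pvCell g (r : Int) (c : Int) == "L" && pvAllUnoccA g (c : Int) (r : Int)
             then "#"
           else if pvCell g (r : Int) (c : Int) == "#" &&
               decide (5 ≤ pvCountOccA g (c : Int) (r : Int)) then "L"
           else pvCell g (r : Int) (c : Int)) := by
        rw [← pv_getD_elem _ "" c hc1]
        exact PySem.List.pyGetD_map_pyRange _ (pvRow g (r : Int)).length c "" hc
      rw [this, hL, hH]
      simp [hcell]

lemma pv_countA_noseat (g : List (List String)) (h : pvNoSeat g) : pvCountTotalA g = 0 := by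
  unfold pvCountTotalA
  apply List.sum_eq_zero
  intro x hx
  simp only [List.mem_map] at hx
  obtain ⟨row, hrow, rfl⟩ := hx
  apply List.sum_eq_zero
  intro y hy
  simp only [List.mem_map] at hy
  obtain ⟨s, hs, rfl⟩ := hy
  have := h row hrow s hs
  simp_all

lemma pv_loopA_noseat (g : List (List String)) (h : pvNoSeat g) (f : Nat) :
    pvLoopA (f + 2) none g = 0 := by
  simp [pvLoopA, pv_stepA_noseat g h, pv_countA_noseat g h]

lemma pv_sumB_allFalse (occ : List (List Bool)) (h : ∀ row ∈ occ, ∀ b ∈ row, b = false) :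
    pvSumB occ = 0 := by
  unfold pvSumB
  apply List.sum_eq_zero
  intro x hx
  simp only [List.mem_map] at hx
  obtain ⟨row, hrow, rfl⟩ := hx
  apply List.sum_eq_zero
  intro y hy
  simp only [List.mem_map] at hy
  obtain ⟨b, hb, rfl⟩ := hy
  rw [h row hrow b hb]
  rfl

lemma pv_nbrsB_noseat (g : List (List String)) (h : pvNoSeat g) (C : Int) :
    ∀ row ∈ pvNbrsB g (PySem.List.len g) C, ∀ o ∈ row, o = none := by
  intro row hrow o ho
  unfold pvNbrsB at hrow
  simp only [List.mem_map] at hrow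
  obtain ⟨ri, hri, rfl⟩ := hrow
  simp only [List.mem_map] at ho
  obtain ⟨ci, hci, rfl⟩ := ho
  have hrb := (PySem.List.mem_pyRange_one.mp hri)
  have hcb := (PySem.List.mem_pyRange_one.mp hci)
  rw [PySem.List.len_eq] at hrb
  obtain ⟨rn, rfl⟩ : ∃ n : Nat, ri = (n : Int) := ⟨ri.toNat, by omega⟩
  have hr : rn < g.length := by omega
  have hrow' : pvRow g (rn : Int) = g[rn] := pv_getD_elem _ [] _ hr
  have hlen : (pvRow g (rn : Int)).length = g[rn].length := by rw [hrow']
  rw [PySem.List.len_eq, hlen] at hcb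
  obtain ⟨cn, rfl⟩ : ∃ n : Nat, ci = (n : Int) := ⟨ci.toNat, by omega⟩
  have hc : cn < g[rn].length := by omega
  have hcell : pvCell g (rn : Int) (cn : Int) = g[rn][cn] := by
    unfold pvCell
    rw [hrow']
    exact pv_getD_elem _ "" _ hc
  have hno := h g[rn] (List.getElem_mem hr) _ (List.getElem_mem hc)
  have hseat : pvSeatB g (rn : Int) (cn : Int) = false := by
    unfold pvSeatB
    rw [hcell]
    simp_all
  rw [hseat]
  rfl

lemma pv_stepB_noseat (g : List (List String)) (h : pvNoSeat g) (C : Int)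
    (occ : List (List Bool)) :
    ∀ row ∈ pvStepB (pvNbrsB g (PySem.List.len g) C) occ, ∀ b ∈ row, b = false := by
  intro row hrow b hb
  unfold pvStepB at hrow
  simp only [List.mem_map] at hrow
  obtain ⟨rp, hrp, rfl⟩ := hrow
  simp only [List.mem_map] at hb
  obtain ⟨cp, hcp, rfl⟩ := hb
  have h1 : rp.1 ∈ pvNbrsB g (PySem.List.len g) C := (List.of_mem_zip hrp).1
  have h2 : cp.1 ∈ rp.1 := (List.of_mem_zip hcp).1
  rw [pv_nbrsB_noseat g h C rp.1 h1 cp.1 h2]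

lemma pv_loopB_noseat (g : List (List String)) (h : pvNoSeat g) (C : Int)
    (occ : List (List Bool)) (f : Nat) :
    pvLoopB (pvNbrsB g (PySem.List.len g) C) (f + 2) none occ = 0 := by
  have e1 := pv_sumB_allFalse _ (pv_stepB_noseat g h C occ)
  have e2 := pv_sumB_allFalse _
    (pv_stepB_noseat g h C (pvStepB (pvNbrsB g (PySem.List.len g) C) occ))
  simp only [PySem.List.len_eq] at e1 e2
  simp [pvLoopB, e1, e2]

-- ===== VERDICT (by name: the statement is the Claim_ definition above) =====
theorem get_final_occupied_count_spec : Claim_equal_get_final_occupied_count := by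
  intro grid _ hpre
  unfold Spec_get_final_occupied_count get_final_occupied_count get_final_occupied_count_alt
  cases hpre with
  | inl hrect => exact pv_main grid hrect (pvFuelLoop grid) grid _ (pv_rel_init grid) none
  | inr hns =>
      have h2 : pvFuelLoop grid = (pvFuelLoop grid - 2) + 2 := by unfold pvFuelLoop; omega
      rw [h2, pv_loopA_noseat grid hns, pv_loopB_noseat grid hns]
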